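-- pv_equiv track=rewrite | github.com/jang1563/manuscript-writing-harness | scripts/run_overnight_validation.py | diff_hashes
-- ===== SOURCE A (Python) =====
-- def diff_hashes(baseline: dict[str, str], current: dict[str, str]) -> list[dict[str, str]]:
--     drift: list[dict[str, str]] = []
--     for relative in sorted(set(baseline) | set(current)):
--         if relative not in baseline:
--             drift.append({"path": relative, "status": "new"})
--         elif relative not in current:
--             drift.append({"path": relative, "status": "missing"})
--         elif baseline[relative] != current[relative]:
--             drift.append({"path": relative, "status": "changed"})
--     return drift
-- ===== SOURCE B (Python) =====
-- def diff_hashes(baseline: dict[str, str], current: dict[str, str]) -> list[dict[str, str]]: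
--     bk, ck = set(baseline), set(current)
--     entries = [{"path": k, "status": "new"} for k in ck - bk]
--     entries += [{"path": k, "status": "missing"} for k in bk - ck]
--     entries += [{"path": k, "status": "changed"} for k in bk & ck if baseline[k] != current[k]]
--     return sorted(entries, key=lambda e: e["path"])
-- ===== Notes on version B (the rewrite author's own statement) =====
-- stated objective: simpler
-- what changed: Replaces the single sorted-union loop with a three-branch elif chain by three independent set-algebra group computations (new = current-baseline, missing = baseline-current, changed = filtered intersection) whose merged entry list is sorted by path at the end.
import Mathlib
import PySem

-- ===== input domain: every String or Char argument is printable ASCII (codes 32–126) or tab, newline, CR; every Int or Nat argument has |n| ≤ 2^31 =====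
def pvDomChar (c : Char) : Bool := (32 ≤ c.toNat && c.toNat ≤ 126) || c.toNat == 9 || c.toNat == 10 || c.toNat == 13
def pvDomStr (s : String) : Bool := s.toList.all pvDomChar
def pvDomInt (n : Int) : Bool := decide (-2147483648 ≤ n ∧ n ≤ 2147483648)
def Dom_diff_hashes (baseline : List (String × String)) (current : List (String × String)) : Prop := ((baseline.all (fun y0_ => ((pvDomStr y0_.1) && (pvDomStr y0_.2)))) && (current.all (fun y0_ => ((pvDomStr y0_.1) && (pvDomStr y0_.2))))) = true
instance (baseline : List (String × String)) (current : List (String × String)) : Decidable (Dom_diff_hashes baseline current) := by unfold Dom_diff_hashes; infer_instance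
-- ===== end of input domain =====

-- B replaces A's single sorted-union loop (elif chain) by three independent set-algebra groups
-- (new / missing / changed) merged and sorted by path at the end; objective: simpler.

-- ===== PORT A =====
def diff_hashes (baseline : List (String × String)) (current : List (String × String)) : List (List (String × String)) :=
  let bd := PySem.Dict.ofList baseline
  let cd := PySem.Dict.ofList current
  (PySem.List.sorted (PySem.Set.union (PySem.Set.ofList bd.keys) (PySem.Set.ofList cd.keys)) (fun k => k) false).foldl
    (fun drift rel =>
      if !bd.contains rel then drift ++ [[("path", rel), ("status", "new")]]
      else if !cd.contains rel then drift ++ [[("path", rel), ("status", "missing")]]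
      else if bd.getD rel "" != cd.getD rel "" then drift ++ [[("path", rel), ("status", "changed")]]
      else drift) []

-- ===== PORT B =====
def diff_hashes_alt (baseline : List (String × String)) (current : List (String × String)) : List (List (String × String)) :=
  let bd := PySem.Dict.ofList baseline
  let cd := PySem.Dict.ofList current
  let bk := PySem.Set.ofList bd.keys
  let ck := PySem.Set.ofList cd.keys
  let entries :=
    (PySem.Set.diff ck bk).map (fun k => [("path", k), ("status", "new")]) ++
    (PySem.Set.diff bk ck).map (fun k => [("path", k), ("status", "missing")]) ++
    ((PySem.Set.inter bk ck).filter (fun k => bd.getD k "" != cd.getD k "")).map (fun k => [("path", k), ("status", "changed")])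
  PySem.List.sorted entries (fun e => (PySem.Dict.mk e).getD "path" "") false

-- ===== PRECONDITION & SPEC =====
def Spec_diff_hashes (baseline : List (String × String)) (current : List (String × String)) (out : List (List (String × String))) : Prop := out = diff_hashes_alt baseline current
instance (baseline : List (String × String)) (current : List (String × String)) (out : List (List (String × String))) : Decidable (Spec_diff_hashes baseline current out) := by unfold Spec_diff_hashes; infer_instance

-- ===== CLAIM (what is proved, stated in full; the proofs are below) =====
def Claim_equal_diff_hashes : Prop := ∀ (baseline : List (String × String)) (current : List (String × String)), Dom_diff_hashes baseline current → Spec_diff_hashes baseline current (diff_hashes baseline current)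

-- ===== LEMMAS AND PROOFS =====

/-- The per-key classification A's loop body performs. -/
def pvClassify (bd cd : PySem.Dict String String) (k : String) : Option (List (String × String)) :=
  if !bd.contains k then some [("path", k), ("status", "new")]
  else if !cd.contains k then some [("path", k), ("status", "missing")]
  else if bd.getD k "" != cd.getD k "" then some [("path", k), ("status", "changed")]
  else none

lemma pvFoldl (bd cd : PySem.Dict String String) (l : List String) (acc : List (List (String × String))) :
    l.foldl (fun drift rel =>
      if !bd.contains rel then drift ++ [[("path", rel), ("status", "new")]]
      else if !cd.contains rel then drift ++ [[("path", rel), ("status", "missing")]]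
      else if bd.getD rel "" != cd.getD rel "" then drift ++ [[("path", rel), ("status", "changed")]]
      else drift) acc = acc ++ l.filterMap (pvClassify bd cd) := by
  induction l generalizing acc with
  | nil => simp
  | cons x xs ih =>
    rw [List.foldl_cons, List.filterMap_cons, pvClassify]
    split_ifs <;> rw [ih] <;> simp

lemma pvFilterMapSplit {α β : Type} (l : List α) (p q : α → Bool) (f g : α → β) :
    (l.filterMap (fun x => if p x then some (f x) else if q x then some (g x) else none)).Perm
      ((l.filter p).map f ++ (l.filter (fun x => !p x && q x)).map g) := by
  induction l with
  | nil => simp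
  | cons x xs ih =>
    by_cases hp : p x
    · simpa [hp] using ih.cons (f x)
    · by_cases hq : q x
      · simp only [List.filterMap_cons, List.filter_cons, hp, hq, if_true,
          Bool.not_false, Bool.true_and, List.map_cons]
        exact (ih.cons (g x)).trans List.perm_middle.symm
      · simpa [hp, hq] using ih

lemma pvKeyClassify (bd cd : PySem.Dict String String) (k : String) (e : List (String × String))
    (h : pvClassify bd cd k = some e) : (PySem.Dict.mk e).getD "path" "" = k := by
  unfold pvClassify at h
  split_ifs at h <;> simp only [Option.some.injEq] at h <;> subst h <;>
    simp [PySem.Dict.getD, PySem.Dict.get?_mk_cons]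

lemma pvFilterMapSome {α β : Type} (l : List α) (f : α → Option β) (g : α → β)
    (h : ∀ x ∈ l, f x = some (g x)) : l.filterMap f = l.map g := by
  induction l with
  | nil => rfl
  | cons x xs ih =>
    rw [List.filterMap_cons, h x (List.mem_cons_self), List.map_cons,
      ih (fun y hy => h y (List.mem_cons_of_mem _ hy))]

-- ===== VERDICT (by name: the statement is the Claim_ definition above) =====
theorem diff_hashes_spec : Claim_equal_diff_hashes := by
  intro baseline current _
  unfold Spec_diff_hashes diff_hashes diff_hashes_alt
  dsimp only
  set bd := PySem.Dict.ofList baseline with hbd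
  set cd := PySem.Dict.ofList current with hcd
  set bk := PySem.Set.ofList bd.keys with hbk
  set ck := PySem.Set.ofList cd.keys with hck
  set U := PySem.Set.union bk ck with hU
  set K := PySem.List.sorted U (fun k => k) false with hK
  rw [pvFoldl, List.nil_append]
  set keyf : List (String × String) → String := fun e => (PySem.Dict.mk e).getD "path" "" with hkeyf
  have hbknd : bk.Nodup := by rw [hbk]; exact PySem.Set.nodup_ofList _
  have hUsplit : U = bk ++ PySem.Set.diff ck bk := by
    rw [hU, PySem.Set.union, PySem.Set.update_eq_append_filter]
    have h : PySem.Set.ofList ck = ck := by rw [hck, PySem.Set.ofList_ofList]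
    rw [h]
    rfl
  have hKU : K.Perm U := PySem.List.sorted_perm _ _ _
  have hbmem : ∀ k, bd.contains k = true ↔ k ∈ bk := by
    intro k; rw [hbk, PySem.Set.mem_ofList, PySem.Dict.contains_iff_mem_keys]
  have hcc : ∀ k, PySem.Set.contains ck k = cd.contains k := by
    intro k
    rw [PySem.Set.contains_eq_listContains, List.contains_eq_mem,
      PySem.Dict.contains_eq_decide_mem_keys]
    simp [hck, PySem.Set.mem_ofList]
  -- the permutation between A's filterMap and B's grouped entries
  have hperm : (K.filterMap (pvClassify bd cd)).Perm
      ((PySem.Set.diff ck bk).map (fun k => [("path", k), ("status", "new")]) ++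
       ((PySem.Set.diff bk ck).map (fun k => [("path", k), ("status", "missing")]) ++
        ((PySem.Set.inter bk ck).filter (fun k => bd.getD k "" != cd.getD k "")).map
          (fun k => [("path", k), ("status", "changed")]))) := by
    refine (hKU.filterMap _).trans ?_
    rw [hUsplit, List.filterMap_append]
    have hnew : (PySem.Set.diff ck bk).filterMap (pvClassify bd cd)
        = (PySem.Set.diff ck bk).map (fun k => [("path", k), ("status", "new")]) := by
      apply pvFilterMapSome
      intro k hk
      have hnb : k ∉ bk := ((PySem.Set.mem_diff ck bk k).mp hk).2
      have hc : bd.contains k = false := by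
        rcases Bool.eq_false_or_eq_true (bd.contains k) with h | h
        · exact absurd ((hbmem k).mp h) hnb
        · exact h
      simp [pvClassify, hc]
    have hb : (bk.filterMap (pvClassify bd cd)).Perm
        ((PySem.Set.diff bk ck).map (fun k => [("path", k), ("status", "missing")]) ++
         ((PySem.Set.inter bk ck).filter (fun k => bd.getD k "" != cd.getD k "")).map
           (fun k => [("path", k), ("status", "changed")])) := by
      have hcongr : bk.filterMap (pvClassify bd cd)
          = bk.filterMap (fun k =>
              if !cd.contains k then some [("path", k), ("status", "missing")]
              else if bd.getD k "" != cd.getD k "" then some [("path", k), ("status", "changed")]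
              else none) := by
        apply List.filterMap_congr
        intro k hk
        have hc : bd.contains k = true := (hbmem k).mpr hk
        simp [pvClassify, hc]
      rw [hcongr]
      refine (pvFilterMapSplit bk (fun k => !cd.contains k)
        (fun k => bd.getD k "" != cd.getD k "") _ _).trans ?_
      have h1 : bk.filter (fun k => !cd.contains k) = PySem.Set.diff bk ck := by
        rw [PySem.Set.diff]
        apply List.filter_congr
        intro k _
        rw [hcc k]
      have h2 : bk.filter (fun k => !(!cd.contains k) && (bd.getD k "" != cd.getD k ""))
          = (PySem.Set.inter bk ck).filter (fun k => bd.getD k "" != cd.getD k "") := by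
        rw [PySem.Set.inter, List.filter_filter]
        apply List.filter_congr
        intro k _
        rw [hcc k, Bool.not_not, Bool.and_comm]
      rw [h1, h2]
    rw [hnew]
    exact List.perm_append_comm.trans (List.Perm.append_left _ hb)
  -- A's output is strictly increasing on the path key
  have hUnd : U.Nodup := by
    rw [hU, PySem.Set.union]
    exact PySem.Set.nodup_update _ _ hbknd
  have hKnd : K.Nodup := hKU.symm.nodup hUnd
  have hKlt : K.Pairwise (fun a b => a < b) := by
    have hle : K.Pairwise (fun a b : String => a ≤ b) := by
      simpa using PySem.List.sorted_pairwise U (fun k => k)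
    exact List.Pairwise.imp₂ (fun a b h1 h2 => lt_of_le_of_ne h1 h2) hle hKnd
  have hpair : (K.filterMap (pvClassify bd cd)).Pairwise (fun e e' => keyf e < keyf e') := by
    rw [List.pairwise_filterMap]
    refine hKlt.imp_of_mem ?_
    intro a b _ _ hab e he e' he'
    rw [hkeyf]
    simp only []
    rw [pvKeyClassify bd cd a e he, pvKeyClassify bd cd b e' he']
    exact hab
  rw [← List.append_assoc] at hperm
  exact (PySem.List.sorted_eq_of_perm_of_pairwise_lt _ _ _ hperm hpair).symm
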